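-- pv_equiv track=rewrite | github.com/Antn-Amlrc/Calendar_2020 | day12_part2.py | rotate_waypoint
-- ===== SOURCE A (Python) =====
-- def rotate_waypoint(action, ax, computed_waypoint):
--     """ Rotate waypoint. """
--     x, y = computed_waypoint
--     while ax:
--         x,y = y,x  # y and x exchange their values at each 90° rotation
--         if action=="R":
--             y = -y
--         else:
--             x = -x
--         ax-=1
--     wp = {"E":0, "W":0, "N":0, "S":0}
--     # Modification of E/W position
--     if x<=0:
--         wp["W"] = abs(x)
--         wp["E"] = 0
--     else:
--         wp["E"] = abs(x)
--         wp["W"] = 0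
--     # Modification of N/S position
--     if y<=0:
--         wp["S"] = abs(y)
--         wp["N"] = 0
--     else:
--         wp["N"] = abs(y)
--         wp["S"] = 0
--     return wp, [x,y]
-- ===== SOURCE B (Python) =====
-- def rotate_waypoint(action, ax, computed_waypoint):
--     """ Rotate waypoint: O(1) via ax mod 4 instead of looping ax times. """
--     x, y = computed_waypoint
--     r = ax % 4
--     if action != "R":
--         r = -r % 4
--     if r == 1:
--         x, y = y, -x
--     elif r == 2:
--         x, y = -x, -y
--     elif r == 3:
--         x, y = -y, x
--     wp = {"E": max(x, 0), "W": max(-x, 0), "N": max(y, 0), "S": max(-y, 0)}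
--     return wp, [x, y]
-- ===== Notes on version B (the rewrite author's own statement) =====
-- stated objective: faster
-- what changed: B replaces A's ax-iteration rotation loop by reducing ax mod 4 and applying the corresponding rotation once, and builds the compass dict directly with max instead of branching.
import Mathlib
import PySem

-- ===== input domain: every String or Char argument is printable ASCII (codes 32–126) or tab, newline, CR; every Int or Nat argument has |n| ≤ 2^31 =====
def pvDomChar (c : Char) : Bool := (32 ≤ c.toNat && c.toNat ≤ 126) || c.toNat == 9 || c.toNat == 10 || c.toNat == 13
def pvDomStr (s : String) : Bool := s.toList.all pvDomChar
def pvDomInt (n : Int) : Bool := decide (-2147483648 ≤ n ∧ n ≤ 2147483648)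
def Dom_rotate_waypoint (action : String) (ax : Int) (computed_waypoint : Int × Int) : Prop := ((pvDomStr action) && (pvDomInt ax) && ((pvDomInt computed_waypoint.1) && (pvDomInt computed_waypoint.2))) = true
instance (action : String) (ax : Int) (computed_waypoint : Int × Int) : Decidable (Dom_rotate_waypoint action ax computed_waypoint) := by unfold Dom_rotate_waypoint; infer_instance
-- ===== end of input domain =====

-- B reduces ax mod 4 and rotates once (O(1)) instead of looping ax times; equivalence is proved on ax ≥ 0.

-- ===== PORT A =====
-- A's while loop: one 90° step per iteration, ax counted down to 0 (fuel = ax.toNat; exact for ax ≥ 0, A diverges for ax < 0)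
def pvRotLoop (action : String) : Nat → Int × Int → Int × Int
  | 0, p => p
  | n + 1, (x, y) => pvRotLoop action n (if action == "R" then (y, -x) else (-y, x))

-- A's straight-line dict-building tail (the code after the loop), step for step
def pvCompass (x y : Int) : (List (String × Int)) × List Int :=
  let wp : PySem.Dict String Int := PySem.Dict.ofList [("E", 0), ("W", 0), ("N", 0), ("S", 0)]
  let wp := if x ≤ 0 then (wp.insert "W" |x|).insert "E" 0 else (wp.insert "E" |x|).insert "W" 0
  let wp := if y ≤ 0 then (wp.insert "S" |y|).insert "N" 0 else (wp.insert "N" |y|).insert "S" 0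
  (wp.items, [x, y])

def rotate_waypoint (action : String) (ax : Int) (computed_waypoint : Int × Int) : (List (String × Int)) × List Int :=
  let (x, y) := pvRotLoop action ax.toNat computed_waypoint
  pvCompass x y

-- ===== PORT B =====
def rotate_waypoint_alt (action : String) (ax : Int) (computed_waypoint : Int × Int) : (List (String × Int)) × List Int :=
  let x := computed_waypoint.1
  let y := computed_waypoint.2
  let r := PySem.Int.mod ax 4
  let r := if action != "R" then PySem.Int.mod (-r) 4 else r
  let (x, y) :=
    if r = 1 then (y, -x)
    else if r = 2 then (-x, -y)
    else if r = 3 then (-y, x)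
    else (x, y)
  ([("E", max x 0), ("W", max (-x) 0), ("N", max y 0), ("S", max (-y) 0)], [x, y])

-- ===== PRECONDITION & SPEC =====
-- Pre_ excludes ax < 0, on which A's 'while ax: ... ax -= 1' never terminates (A returns no value there).
def Pre_rotate_waypoint (action : String) (ax : Int) (computed_waypoint : Int × Int) : Prop := 0 ≤ ax
instance (action : String) (ax : Int) (computed_waypoint : Int × Int) : Decidable (Pre_rotate_waypoint action ax computed_waypoint) := by unfold Pre_rotate_waypoint; infer_instance
def pvWitness_rotate_waypoint : String × Int × (Int × Int) := ("R", 5, (3, -2))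

def Spec_rotate_waypoint (action : String) (ax : Int) (computed_waypoint : Int × Int) (out : (List (String × Int)) × List Int) : Prop := out = rotate_waypoint_alt action ax computed_waypoint
instance (action : String) (ax : Int) (computed_waypoint : Int × Int) (out : (List (String × Int)) × List Int) : Decidable (Spec_rotate_waypoint action ax computed_waypoint out) := by unfold Spec_rotate_waypoint; infer_instance

-- ===== CLAIM (what is proved, stated in full; the proofs are below) =====
def Claim_equal_rotate_waypoint : Prop := ∀ (action : String) (ax : Int) (computed_waypoint : Int × Int), Dom_rotate_waypoint action ax computed_waypoint → Pre_rotate_waypoint action ax computed_waypoint → Spec_rotate_waypoint action ax computed_waypoint (rotate_waypoint action ax computed_waypoint)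

-- ===== LEMMAS AND PROOFS =====

-- four rotation steps are the identity
theorem pvRotLoop_add_four (action : String) (n : Nat) (p : Int × Int) :
    pvRotLoop action (n + 4) p = pvRotLoop action n p := by
  obtain ⟨x, y⟩ := p
  show pvRotLoop action (n + 1 + 1 + 1 + 1) (x, y) = pvRotLoop action n (x, y)
  by_cases h : action == "R" <;> simp [pvRotLoop, h]

-- the loop only depends on the iteration count mod 4
theorem pvRotLoop_mod (action : String) (n : Nat) (p : Int × Int) :
    pvRotLoop action n p = pvRotLoop action (n % 4) p := by
  induction n using Nat.strong_induction_on with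
  | _ n ih =>
    by_cases h : n < 4
    · rw [Nat.mod_eq_of_lt h]
    · have h4 : n - 4 + 4 = n := by omega
      have := pvRotLoop_add_four action (n - 4) p
      rw [h4] at this
      rw [this, ih (n - 4) (by omega)]
      congr 1
      omega

-- A's dict tail, evaluated: insertion order stays E, W, N, S; each value is the max-form B uses
theorem pvCompass_eq (x y : Int) :
    pvCompass x y = ([("E", max x 0), ("W", max (-x) 0), ("N", max y 0), ("S", max (-y) 0)], [x, y]) := by
  unfold pvCompass
  split_ifs <;>
    simp [PySem.Dict.ofList, PySem.Dict.update, PySem.Dict.empty, PySem.Dict.insert,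
      PySem.Dict.contains] <;>
    (try simp only [Int.abs_eq_natAbs]) <;>
    omega

theorem rotate_waypoint_spec_aux (action : String) (ax : Int) (cw : Int × Int) (hax : 0 ≤ ax) :
    rotate_waypoint action ax cw = rotate_waypoint_alt action ax cw := by
  obtain ⟨x, y⟩ := cw
  have hmod : PySem.Int.mod ax 4 = ((ax.toNat % 4 : Nat) : Int) := by
    rw [PySem.Int.mod_eq_emod_of_pos (by omega)]
    omega
  have h4 : ax.toNat % 4 = 0 ∨ ax.toNat % 4 = 1 ∨ ax.toNat % 4 = 2 ∨ ax.toNat % 4 = 3 := by omega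
  unfold rotate_waypoint rotate_waypoint_alt
  rw [pvRotLoop_mod, hmod]
  by_cases hR : action == "R"
  · have hR' : (action != "R") = false := by simp_all
    rcases h4 with h | h | h | h <;> rw [h] <;>
      simp [pvRotLoop, hR, hR', pvCompass_eq]
  · have hR' : (action != "R") = true := by simp_all
    rcases h4 with h | h | h | h <;> rw [h] <;>
      simp [pvRotLoop, hR, hR', pvCompass_eq]

-- ===== VERDICT (by name: the statement is the Claim_ definition above) =====
theorem rotate_waypoint_spec : Claim_equal_rotate_waypoint := by
  intro action ax cw _ hpre
  exact rotate_waypoint_spec_aux action ax cw hpre
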